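-- pv_equiv track=rewrite | github.com/sinofseven/powertools-lambda-python-my-extend | aws_lambda_powertools/event_handler/async_execution/routes/ses.py | match_prefix_and_suffix
-- ===== SOURCE A (Python) =====
-- def match_prefix_and_suffix(all_address: list[str], all_prefix: list[str], all_suffix: list[str]) -> bool:
--     for address in all_address:
--         for prefix in all_prefix:
--             for suffix in all_suffix:
--                 length_suffix = len(suffix)
--                 address_suffix = address[-length_suffix:]
--                 if address.find(prefix) == 0 and address_suffix == suffix:
--                     return True
--     return False
-- ===== SOURCE B (Python) =====
-- def match_prefix_and_suffix(all_address: list[str], all_prefix: list[str], all_suffix: list[str]) -> bool: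
--     # One pass over the addresses: test prefixes and suffixes independently,
--     # O(A*(P+S)) instead of A's O(A*P*S).
--     return any(
--         any(address.startswith(prefix) for prefix in all_prefix)
--         and any(address[-len(suffix):] == suffix for suffix in all_suffix)
--         for address in all_address
--     )
-- ===== Notes on version B (the rewrite author's own statement) =====
-- stated objective: faster
-- what changed: B makes one pass over the addresses and tests prefix-match and suffix-match independently per address (any/any), instead of A's triple nested loop over every (address, prefix, suffix) combination.
import Mathlib
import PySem

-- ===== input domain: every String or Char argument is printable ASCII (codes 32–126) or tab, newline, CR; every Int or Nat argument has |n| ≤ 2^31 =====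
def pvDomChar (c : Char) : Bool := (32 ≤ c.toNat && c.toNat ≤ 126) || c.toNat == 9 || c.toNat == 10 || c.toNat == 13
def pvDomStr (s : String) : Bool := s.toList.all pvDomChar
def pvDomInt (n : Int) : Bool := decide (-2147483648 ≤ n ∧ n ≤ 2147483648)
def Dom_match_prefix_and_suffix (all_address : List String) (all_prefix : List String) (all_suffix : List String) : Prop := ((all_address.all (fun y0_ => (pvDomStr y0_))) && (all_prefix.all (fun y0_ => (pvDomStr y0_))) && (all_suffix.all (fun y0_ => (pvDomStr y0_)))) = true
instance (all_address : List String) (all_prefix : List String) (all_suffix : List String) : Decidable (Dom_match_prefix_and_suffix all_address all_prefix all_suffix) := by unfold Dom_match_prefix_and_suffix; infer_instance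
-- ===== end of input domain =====

-- B replaces A's triple nested loop by one pass over the addresses with independent
-- prefix/suffix any-tests per address (objective: faster, O(A*(P+S)) vs O(A*P*S)).

-- ===== PORT A =====
-- innermost loop: for suffix in all_suffix (with early return True)
def mpsLoopSuffix (address : String) (prefix_ : String) : List String → Bool
  | [] => false
  | suffix :: rest =>
    let length_suffix : Int := PySem.Str.len suffix
    let address_suffix : String := PySem.Str.slice address (some (-length_suffix)) none
    if PySem.Str.find address prefix_ = 0 ∧ address_suffix = suffix then true
    else mpsLoopSuffix address prefix_ rest

-- middle loop: for prefix in all_prefix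
def mpsLoopPrefix (address : String) (all_suffix : List String) : List String → Bool
  | [] => false
  | prefix_ :: rest =>
    if mpsLoopSuffix address prefix_ all_suffix then true
    else mpsLoopPrefix address all_suffix rest

-- outer loop: for address in all_address
def mpsLoopAddress (all_prefix : List String) (all_suffix : List String) : List String → Bool
  | [] => false
  | address :: rest =>
    if mpsLoopPrefix address all_suffix all_prefix then true
    else mpsLoopAddress all_prefix all_suffix rest

def match_prefix_and_suffix (all_address : List String) (all_prefix : List String) (all_suffix : List String) : Bool :=
  mpsLoopAddress all_prefix all_suffix all_address

-- ===== PORT B =====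
def match_prefix_and_suffix_alt (all_address : List String) (all_prefix : List String) (all_suffix : List String) : Bool :=
  all_address.any (fun address =>
    all_prefix.any (fun prefix_ => PySem.Str.startswith address prefix_)
    && all_suffix.any (fun suffix =>
         PySem.Str.slice address (some (-(PySem.Str.len suffix : Int))) none == suffix))

-- ===== PRECONDITION & SPEC =====
def Spec_match_prefix_and_suffix (all_address : List String) (all_prefix : List String) (all_suffix : List String) (out : Bool) : Prop := out = match_prefix_and_suffix_alt all_address all_prefix all_suffix
instance (all_address : List String) (all_prefix : List String) (all_suffix : List String) (out : Bool) : Decidable (Spec_match_prefix_and_suffix all_address all_prefix all_suffix out) := by unfold Spec_match_prefix_and_suffix; infer_instance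

-- ===== CLAIM (what is proved, stated in full; the proofs are below) =====
def Claim_equal_match_prefix_and_suffix : Prop := ∀ (all_address : List String) (all_prefix : List String) (all_suffix : List String), Dom_match_prefix_and_suffix all_address all_prefix all_suffix → Spec_match_prefix_and_suffix all_address all_prefix all_suffix (match_prefix_and_suffix all_address all_prefix all_suffix)

-- ===== LEMMAS AND PROOFS =====

-- address.find(prefix) == 0 is exactly startswith
theorem find_eq_zero_iff_startswith (a p : String) :
    PySem.Str.find a p = 0 ↔ PySem.Str.startswith a p = true := by
  simp only [PySem.Str.find_eq, PySem.Str.startswith_eq]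
  constructor
  · intro h
    rw [PySem.Chars.startswith_iff]
    have hs := PySem.Chars.find_spec (s := a.toList) (sub := p.toList) (by simp [h])
    simpa [h] using hs.1
  · intro h
    rw [PySem.Chars.startswith_iff] at h
    have h0 : 0 ≤ PySem.Chars.find a.toList p.toList := by
      rw [PySem.Chars.find_nonneg_iff]
      exact h.isInfix
    have hs := PySem.Chars.find_spec (s := a.toList) (sub := p.toList) h0
    by_contra hne
    have hlt : 0 < (PySem.Chars.find a.toList p.toList).toNat := by omega
    have := hs.2 0 hlt
    simp at this
    exact this h

theorem decide_find_eq_startswith (a p : String) :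
    decide (PySem.Str.find a p = 0) = PySem.Str.startswith a p := by
  by_cases h : PySem.Str.find a p = 0
  · rw [decide_eq_true h, (find_eq_zero_iff_startswith a p).1 h]
  · rw [decide_eq_false h]
    cases hsw : PySem.Str.startswith a p with
    | false => rfl
    | true => exact absurd ((find_eq_zero_iff_startswith a p).2 hsw) h

theorem mpsLoopSuffix_eq (a p : String) (ss : List String) :
    mpsLoopSuffix a p ss =
      (decide (PySem.Str.find a p = 0)
        && ss.any (fun s => PySem.Str.slice a (some (-PySem.Str.len s)) none == s)) := by
  induction ss with
  | nil => simp [mpsLoopSuffix]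
  | cons s rest ih =>
    simp only [mpsLoopSuffix, List.any_cons]
    by_cases hc : PySem.Str.find a p = 0 ∧ PySem.Str.slice a (some (-PySem.Str.len s)) none = s
    · rw [if_pos hc, decide_eq_true hc.1, beq_iff_eq.mpr hc.2, Bool.true_and, Bool.true_or]
    · rw [if_neg hc, ih]
      by_cases hA : PySem.Str.find a p = 0
      · have hB : PySem.Str.slice a (some (-PySem.Str.len s)) none ≠ s := fun hB => hc ⟨hA, hB⟩
        rw [beq_eq_false_iff_ne.mpr hB, Bool.false_or]
      · rw [decide_eq_false hA, Bool.false_and, Bool.false_and]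

theorem mpsLoopPrefix_eq (a : String) (ss ps : List String) :
    mpsLoopPrefix a ss ps =
      (ps.any (fun p => PySem.Str.startswith a p)
        && ss.any (fun s => PySem.Str.slice a (some (-PySem.Str.len s)) none == s)) := by
  induction ps with
  | nil => simp [mpsLoopPrefix]
  | cons p rest ih =>
    simp only [mpsLoopPrefix, List.any_cons, mpsLoopSuffix_eq, decide_find_eq_startswith]
    by_cases h : (PySem.Str.startswith a p
        && ss.any (fun s => PySem.Str.slice a (some (-PySem.Str.len s)) none == s)) = true
    · rw [if_pos h]
      rcases (Bool.and_eq_true _ _).mp h with ⟨h1, h2⟩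
      rw [h1, h2, Bool.true_or, Bool.true_and]
    · rw [if_neg h, ih]
      by_cases hss : (ss.any (fun s => PySem.Str.slice a (some (-PySem.Str.len s)) none == s)) = true
      · have hsw : PySem.Str.startswith a p = false := by
          cases hswv : PySem.Str.startswith a p with
          | false => rfl
          | true => exact absurd (by rw [hswv, hss]; rfl) h
        rw [hss, Bool.and_true, Bool.and_true, hsw, Bool.false_or]
      · rw [Bool.not_eq_true] at hss
        rw [hss, Bool.and_false, Bool.and_false]

theorem mpsLoopAddress_eq (ps ss aa : List String) :
    mpsLoopAddress ps ss aa = match_prefix_and_suffix_alt aa ps ss := by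
  induction aa with
  | nil => simp [mpsLoopAddress, match_prefix_and_suffix_alt]
  | cons a rest ih =>
    simp only [mpsLoopAddress, match_prefix_and_suffix_alt, List.any_cons, mpsLoopPrefix_eq]
    by_cases h : ((ps.any (fun p => PySem.Str.startswith a p))
        && ss.any (fun s => PySem.Str.slice a (some (-PySem.Str.len s)) none == s)) = true
    · rw [if_pos h, h, Bool.true_or]
    · rw [if_neg h]
      rw [Bool.not_eq_true] at h
      rw [h, Bool.false_or]
      simpa [match_prefix_and_suffix_alt] using ih

-- ===== VERDICT (by name: the statement is the Claim_ definition above) =====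
theorem match_prefix_and_suffix_spec : Claim_equal_match_prefix_and_suffix := by
  intro aa ps ss _
  unfold Spec_match_prefix_and_suffix match_prefix_and_suffix
  exact mpsLoopAddress_eq ps ss aa
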